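-- pv_equiv track=rewrite | github.com/venux021/soda | zcy2/c5/q10.py | move_star_left
-- ===== SOURCE A (Python) =====
-- def move_star_left(s):
--     buf = list(s)
--     n = len(s)
--     j = n - 1
--     while j >= 0 and buf[j] != '*':
--         j -= 1
--     if j < 0:
--         return s
--     i = j
--     while i >= 0:
--         if buf[i] != '*':
--             buf[j] = buf[i]
--             buf[i] = '*'
--             j -= 1
--         i -= 1
--     return ''.join(buf)
-- ===== SOURCE B (Python) =====
-- def move_star_left(s):
--     rest = ''.join(c for c in s if c != '*')
--     return '*' * (len(s) - len(rest)) + rest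
-- ===== Notes on version B (the rewrite author's own statement) =====
-- stated objective: simpler
-- what changed: Replaces the rightmost-star search and the in-place two-pointer swap loop with a closed-form build: keep the non-star characters in order and prepend one star per removed character. (single pass building the output directly, no buffer mutation).
import Mathlib
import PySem

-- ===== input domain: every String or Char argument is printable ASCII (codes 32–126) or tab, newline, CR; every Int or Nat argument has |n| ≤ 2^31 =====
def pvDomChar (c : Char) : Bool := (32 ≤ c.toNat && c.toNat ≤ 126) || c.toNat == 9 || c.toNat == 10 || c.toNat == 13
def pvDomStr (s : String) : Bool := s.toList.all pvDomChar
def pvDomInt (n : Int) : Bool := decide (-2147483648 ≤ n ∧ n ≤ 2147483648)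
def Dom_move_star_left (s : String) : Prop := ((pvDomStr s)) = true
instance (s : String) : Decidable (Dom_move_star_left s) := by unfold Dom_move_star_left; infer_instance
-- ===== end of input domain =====

-- B replaces A's rightmost-star search and in-place two-pointer swap loop by a closed-form
-- concatenation: one '*' per removed character, then the non-star characters in order (objective: simpler).

-- ===== PORT A =====
-- buf[i] read; the default is never used: both loops only index with 0 ≤ i < buf.length (exact there)
def pvGetD (buf : List Char) (i : Int) : Char := (PySem.List.pyGet? buf i).getD ' '
-- buf[i] = c; the loop only writes with 0 ≤ i < buf.length, where List.set is exact
def pvSetA (buf : List Char) (i : Int) (c : Char) : List Char := buf.set i.toNat c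

-- while j >= 0 and buf[j] != '*': j -= 1
def findStarA (buf : List Char) (j : Int) : Int :=
  if 0 ≤ j ∧ pvGetD buf j ≠ '*' then findStarA buf (j - 1) else j
termination_by (j + 1).toNat
decreasing_by omega

-- while i >= 0: (if buf[i] != '*': buf[j] = buf[i]; buf[i] = '*'; j -= 1); i -= 1
def moveLoopA (buf : List Char) (i j : Int) : List Char :=
  if 0 ≤ i then
    if pvGetD buf i ≠ '*' then
      moveLoopA (pvSetA (pvSetA buf j (pvGetD buf i)) i '*') (i - 1) (j - 1)
    else
      moveLoopA buf (i - 1) j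
  else buf
termination_by (i + 1).toNat
decreasing_by all_goals omega

def move_star_left (s : String) : String :=
  let buf := s.toList
  let n : Int := buf.length
  let j := findStarA buf (n - 1)
  if j < 0 then s
  else String.ofList (moveLoopA buf j j)

-- ===== PORT B =====
def move_star_left_alt (s : String) : String :=
  let rest := s.toList.filter (fun c => c != '*')
  String.ofList (List.replicate (s.toList.length - rest.length) '*' ++ rest)

-- ===== PRECONDITION & SPEC =====
def Spec_move_star_left (s : String) (out : String) : Prop := out = move_star_left_alt s
instance (s : String) (out : String) : Decidable (Spec_move_star_left s out) := by unfold Spec_move_star_left; infer_instance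

-- ===== CLAIM (what is proved, stated in full; the proofs are below) =====
def Claim_equal_move_star_left : Prop := ∀ (s : String), Dom_move_star_left s → Spec_move_star_left s (move_star_left s)

-- ===== LEMMAS AND PROOFS =====

theorem findStarA_stop (buf : List Char) (j : Int) (h : ¬(0 ≤ j ∧ pvGetD buf j ≠ '*')) :
    findStarA buf j = j := by rw [findStarA, if_neg h]

theorem findStarA_step (buf : List Char) (j : Int) (h : 0 ≤ j ∧ pvGetD buf j ≠ '*') :
    findStarA buf j = findStarA buf (j - 1) := by rw [findStarA, if_pos h]

theorem moveLoopA_stop (buf : List Char) (i j : Int) (h : ¬ 0 ≤ i) :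
    moveLoopA buf i j = buf := by rw [moveLoopA, if_neg h]

theorem moveLoopA_swap (buf : List Char) (i j : Int) (h : 0 ≤ i) (hc : pvGetD buf i ≠ '*') :
    moveLoopA buf i j = moveLoopA (pvSetA (pvSetA buf j (pvGetD buf i)) i '*') (i - 1) (j - 1) := by
  rw [moveLoopA, if_pos h, if_pos hc]

theorem moveLoopA_skip (buf : List Char) (i j : Int) (h : 0 ≤ i) (hc : ¬ pvGetD buf i ≠ '*') :
    moveLoopA buf i j = moveLoopA buf (i - 1) j := by
  rw [moveLoopA, if_pos h, if_neg hc]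

theorem pvGetD_valid (buf : List Char) (n : Nat) (h : n < buf.length) :
    pvGetD buf (n : Int) = buf[n] := by
  simp [pvGetD, PySem.List.pyGet?_natCast, List.getElem?_eq_getElem h]

theorem pvGetD_mid (l : List Char) (c : Char) (l2 : List Char) :
    pvGetD (l ++ c :: l2) ((l.length : Nat) : Int) = c := by
  rw [pvGetD_valid _ l.length (by simp)]
  simp

theorem pvSetA_mid (l : List Char) (c : Char) (l2 : List Char) (n : Nat) (v : Char) :
    pvSetA (l ++ c :: l2) ((l.length + n : Nat) : Int) v = l ++ (c :: l2).set n v := by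
  simp only [pvSetA, Int.toNat_natCast, List.set_append]
  simp

theorem pvGetD_append_left (l l2 : List Char) (n : Nat) (hn : n < l.length) :
    pvGetD (l ++ l2) (n : Int) = pvGetD l (n : Int) := by
  rw [pvGetD_valid _ n (by simp; omega), pvGetD_valid _ n hn]
  exact List.getElem_append_left hn

theorem findStarA_append_last (l : List Char) (c : Char) (j : Int) (hj : j < (l.length : Int)) :
    findStarA (l ++ [c]) j = findStarA l j := by
  by_cases h0 : 0 ≤ j
  · lift j to ℕ using h0 with n
    revert hj
    induction n using Nat.strong_induction_on with
    | _ n ih =>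
      intro hj
      have hn : n < l.length := by exact_mod_cast hj
      have hg := pvGetD_append_left l [c] n hn
      by_cases hcond : pvGetD l (n : Int) ≠ '*'
      · rw [findStarA_step _ _ ⟨by exact_mod_cast n.zero_le, by rw [hg]; exact hcond⟩,
            findStarA_step _ _ ⟨by exact_mod_cast n.zero_le, hcond⟩]
        match n, hn with
        | 0, _ =>
          rw [findStarA_stop _ _ (fun h => by revert h; norm_num),
              findStarA_stop _ _ (fun h => by revert h; norm_num)]
        | n + 1, hn =>
          rw [show ((n + 1 : Nat) : Int) - 1 = (n : Int) from by push_cast; ring]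
          exact ih n (by omega) (by exact_mod_cast Nat.lt_of_succ_lt hn)
      · rw [findStarA_stop _ _ (fun h => hcond (hg ▸ h.2)),
            findStarA_stop _ _ (fun h => hcond h.2)]
  · rw [findStarA_stop _ _ (fun h => h0 h.1), findStarA_stop _ _ (fun h => h0 h.1)]

theorem findStarA_none (t : List Char) (ht : '*' ∉ t) :
    findStarA t ((t.length : Int) - 1) = -1 := by
  induction t using List.reverseRecOn with
  | nil =>
    rw [findStarA_stop _ _ (fun h => by revert h; norm_num)]
    norm_num
  | append_singleton t' c ih =>
    have hc : c ≠ '*' := by intro h; exact ht (by simp [h])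
    have ht' : '*' ∉ t' := fun h => ht (by simp [h])
    have e : ((t' ++ [c]).length : Int) - 1 = ((t'.length : Nat) : Int) := by simp
    rw [e]
    have hget : pvGetD (t' ++ [c]) ((t'.length : Nat) : Int) = c := pvGetD_mid t' c []
    rw [findStarA_step _ _ ⟨by exact_mod_cast t'.length.zero_le, by rw [hget]; exact hc⟩]
    rw [findStarA_append_last t' c _ (by omega)]
    exact ih ht'

theorem findStarA_last (p t : List Char) (ht : '*' ∉ t) :
    findStarA (p ++ '*' :: t) ((p.length : Int) + t.length) = p.length := by
  induction t using List.reverseRecOn with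
  | nil =>
    have hget : pvGetD (p ++ '*' :: []) ((p.length : Nat) : Int) = '*' := pvGetD_mid p '*' []
    rw [show (p.length : Int) + (([] : List Char).length : Int) = ((p.length : Nat) : Int) from by simp]
    rw [findStarA_stop _ _ (fun h => h.2 hget)]
  | append_singleton t' c ih =>
    have hc : c ≠ '*' := by intro h; exact ht (by simp [h])
    have ht' : '*' ∉ t' := fun h => ht (by simp [h])
    have hassoc : p ++ '*' :: (t' ++ [c]) = (p ++ '*' :: t') ++ [c] := by simp
    have elen : (p.length : Int) + ((t' ++ [c]).length : Int) = (((p ++ '*' :: t').length : Nat) : Int) := by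
      simp only [List.length_append, List.length_cons, List.length_nil]; push_cast; ring
    rw [hassoc, elen]
    have hget : pvGetD ((p ++ '*' :: t') ++ [c]) (((p ++ '*' :: t').length : Nat) : Int) = c :=
      pvGetD_mid (p ++ '*' :: t') c []
    rw [findStarA_step _ _ ⟨by exact_mod_cast Nat.zero_le _, by rw [hget]; exact hc⟩]
    rw [show (((p ++ '*' :: t').length : Nat) : Int) - 1 = (p.length : Int) + t'.length from by
      simp only [List.length_append, List.length_cons]; push_cast; ring]
    rw [findStarA_append_last _ c _ (by simp only [List.length_append, List.length_cons]; omega)]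
    exact ih ht'

theorem replicate_set_last (k : Nat) (c : Char) :
    (List.replicate (k + 1) '*').set k c = List.replicate k '*' ++ [c] := by
  rw [List.replicate_succ', List.set_append]
  simp

theorem moveLoopA_main (q : List Char) : ∀ (k : Nat) (m : List Char), 1 ≤ k →
    moveLoopA (q ++ List.replicate k '*' ++ m) ((q.length : Int) - 1) ((q.length : Int) - 1 + k)
      = List.replicate (k + q.count '*') '*' ++ q.filter (fun c => c != '*') ++ m := by
  induction q using List.reverseRecOn with
  | nil =>
    intro k m hk
    rw [moveLoopA_stop _ _ _ (by simp)]
    simp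
  | append_singleton q' c ih =>
    intro k m hk
    obtain ⟨k', rfl⟩ : ∃ k', k = k' + 1 := ⟨k - 1, by omega⟩
    have e1 : (((q' ++ [c]).length : Nat) : Int) - 1 = ((q'.length : Nat) : Int) := by simp
    have hnorm : (q' ++ [c]) ++ List.replicate (k' + 1) '*' ++ m
        = q' ++ c :: (List.replicate (k' + 1) '*' ++ m) := by simp
    rw [e1, hnorm]
    have hget : pvGetD (q' ++ c :: (List.replicate (k' + 1) '*' ++ m)) ((q'.length : Nat) : Int) = c :=
      pvGetD_mid _ _ _
    by_cases hc : c = '*'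
    · subst hc
      rw [moveLoopA_skip _ _ _ (by exact_mod_cast Nat.zero_le _) (by rw [hget]; simp)]
      have hbuf : q' ++ '*' :: (List.replicate (k' + 1) '*' ++ m)
          = q' ++ List.replicate (k' + 2) '*' ++ m := by
        simp [List.replicate_succ]
      have ej : ((q'.length : Nat) : Int) + ((k' + 1 : Nat) : Int)
          = ((q'.length : Nat) : Int) - 1 + ((k' + 2 : Nat) : Int) := by push_cast; ring
      rw [hbuf, ej, ih (k' + 2) m (by omega)]
      have ec : k' + 1 + (q' ++ ['*']).count '*' = k' + 2 + q'.count '*' := by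
        simp [List.count_append]
        omega
      rw [ec]
      simp [List.filter_append]
    · rw [moveLoopA_swap _ _ _ (by exact_mod_cast Nat.zero_le _) (by rw [hget]; exact hc)]
      rw [hget]
      rw [show ((q'.length : Nat) : Int) + ((k' + 1 : Nat) : Int) = ((q'.length + (k' + 1) : Nat) : Int) from by
        push_cast; ring]
      rw [pvSetA_mid]
      rw [show ((c :: (List.replicate (k' + 1) '*' ++ m)).set (k' + 1) c)
          = c :: ((List.replicate (k' + 1) '*').set k' c ++ m) from by
        rw [List.set_cons_succ, List.set_append]
        simp]
      rw [replicate_set_last]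
      rw [show ((q'.length : Nat) : Int) = ((q'.length + 0 : Nat) : Int) from by simp]
      rw [pvSetA_mid]
      rw [List.set_cons_zero]
      have hbuf : q' ++ '*' :: ((List.replicate k' '*' ++ [c]) ++ m)
          = q' ++ List.replicate (k' + 1) '*' ++ (c :: m) := by
        simp [List.replicate_succ]
      rw [hbuf]
      rw [show ((q'.length + 0 : Nat) : Int) - 1 = ((q'.length : Nat) : Int) - 1 from by simp]
      rw [show ((q'.length + (k' + 1) : Nat) : Int) - 1 = ((q'.length : Nat) : Int) - 1 + ((k' + 1 : Nat) : Int) from by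
        push_cast; ring]
      rw [ih (k' + 1) (c :: m) (by omega)]
      have hc' : ¬ ('*' = c) := fun h => hc h.symm
      have ec : (q' ++ [c]).count '*' = q'.count '*' := by
        simp [List.count_append, hc]
      rw [ec]
      simp [List.filter_append, hc]

theorem count_add_filter_length (l : List Char) :
    l.count '*' + (l.filter (fun c => c != '*')).length = l.length := by
  induction l with
  | nil => simp
  | cons c l ih =>
    by_cases h : c = '*' <;> simp [h] <;> omega

theorem exists_last_star_split (l : List Char) (h : '*' ∈ l) :
    ∃ p t, l = p ++ '*' :: t ∧ '*' ∉ t := by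
  induction l using List.reverseRecOn with
  | nil => simp at h
  | append_singleton l' c ih =>
    by_cases hc : c = '*'
    · exact ⟨l', [], by simp [hc], by simp⟩
    · have hl' : '*' ∈ l' := by
        rcases List.mem_append.1 h with h1 | h1
        · exact h1
        · simp at h1; exact absurd h1.symm hc
      obtain ⟨p, t, hpt, hnt⟩ := ih hl'
      exact ⟨p, t ++ [c], by simp [hpt], by simp [hnt]; exact fun h => hc h.symm⟩

-- ===== VERDICT (by name: the statement is the Claim_ definition above) =====
theorem move_star_left_spec : Claim_equal_move_star_left := by
  intro s _
  show move_star_left s = move_star_left_alt s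
  simp only [move_star_left, move_star_left_alt]
  by_cases hm : '*' ∈ s.toList
  · obtain ⟨p, t, hpt, hnt⟩ := exists_last_star_split s.toList hm
    rw [hpt]
    rw [show ((((p ++ '*' :: t).length : Nat) : Int)) - 1 = (p.length : Int) + t.length from by
      simp only [List.length_append, List.length_cons]; push_cast; ring]
    rw [findStarA_last p t hnt]
    rw [if_neg (by omega)]
    have step1 : moveLoopA (p ++ '*' :: t) ((p.length : Nat) : Int) ((p.length : Nat) : Int)
        = moveLoopA (p ++ '*' :: t) (((p.length : Nat) : Int) - 1) ((p.length : Nat) : Int) :=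
      moveLoopA_skip _ _ _ (by exact_mod_cast Nat.zero_le _) (by rw [pvGetD_mid]; simp)
    rw [step1]
    rw [show p ++ '*' :: t = p ++ List.replicate 1 '*' ++ t from by simp]
    rw [show ((p.length : Nat) : Int) = ((p.length : Nat) : Int) - 1 + ((1 : Nat) : Int) from by push_cast; ring]
    rw [show ((p.length : Nat) : Int) - 1 + ((1 : Nat) : Int) - 1 = ((p.length : Nat) : Int) - 1 from by push_cast; ring]
    rw [moveLoopA_main p 1 t (by omega)]
    have hfil : (p ++ List.replicate 1 '*' ++ t).filter (fun c => c != '*')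
        = p.filter (fun c => c != '*') ++ t := by
      have h1 : t.filter (fun c => c != '*') = t :=
        List.filter_eq_self.mpr (fun a ha => by
          have : a ≠ '*' := fun h => hnt (h ▸ ha)
          simpa using this)
      simp [List.filter_append, h1]
    have hcnt : (p ++ List.replicate 1 '*' ++ t).length
        - ((p ++ List.replicate 1 '*' ++ t).filter (fun c => c != '*')).length
        = 1 + p.count '*' := by
      have h1 := count_add_filter_length (p ++ List.replicate 1 '*' ++ t)
      have h2 : (p ++ List.replicate 1 '*' ++ t).count '*'
          = 1 + p.count '*' := by
        simp [List.count_append]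
        rw [List.count_eq_zero_of_not_mem hnt]
        omega
      omega
    rw [hcnt, hfil]
    simp [List.append_assoc]
  · rw [findStarA_none s.toList hm]
    rw [if_pos (by norm_num)]
    have hfil : s.toList.filter (fun c => c != '*') = s.toList :=
      List.filter_eq_self.mpr (fun a ha => by
        have : a ≠ '*' := fun h => hm (h ▸ ha)
        simpa using this)
    rw [hfil]
    simp [String.ofList_toList]
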